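-- pv_equiv track=rewrite | github.com/JasonOdinberg/chatterbox | gradio_vc_app.py | _chunk_indices
-- ===== SOURCE A (Python) =====
-- def _chunk_indices(num_samples, chunk_samples, overlap_samples):
--     if chunk_samples <= 0 or num_samples <= chunk_samples:
--         return [(0, num_samples)]
--     step = max(chunk_samples - overlap_samples, 1)
--     indices = []
--     start = 0
--     while start < num_samples:
--         end = min(start + chunk_samples, num_samples)
--         indices.append((start, end))
--         if end == num_samples:
--             break
--         start += step
--     return indices
-- ===== SOURCE B (Python) =====
-- def _chunk_indices(num_samples, chunk_samples, overlap_samples):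
--     if chunk_samples <= 0 or num_samples <= chunk_samples:
--         return [(0, num_samples)]
--     step = max(chunk_samples - overlap_samples, 1)
--     # last chunk index: first i with i*step + chunk_samples >= num_samples,
--     # capped at the last i with i*step < num_samples
--     last = min((num_samples - chunk_samples + step - 1) // step,
--                (num_samples - 1) // step)
--     return [(i * step, min(i * step + chunk_samples, num_samples))
--             for i in range(last + 1)]
-- ===== Notes on version B (the rewrite author's own statement) =====
-- stated objective: alternative
-- what changed: Replaces the stateful while-loop with break by an arithmetic computation of the last chunk index (a capped ceiling division) followed by a direct comprehension over range().
import Mathlib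
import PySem

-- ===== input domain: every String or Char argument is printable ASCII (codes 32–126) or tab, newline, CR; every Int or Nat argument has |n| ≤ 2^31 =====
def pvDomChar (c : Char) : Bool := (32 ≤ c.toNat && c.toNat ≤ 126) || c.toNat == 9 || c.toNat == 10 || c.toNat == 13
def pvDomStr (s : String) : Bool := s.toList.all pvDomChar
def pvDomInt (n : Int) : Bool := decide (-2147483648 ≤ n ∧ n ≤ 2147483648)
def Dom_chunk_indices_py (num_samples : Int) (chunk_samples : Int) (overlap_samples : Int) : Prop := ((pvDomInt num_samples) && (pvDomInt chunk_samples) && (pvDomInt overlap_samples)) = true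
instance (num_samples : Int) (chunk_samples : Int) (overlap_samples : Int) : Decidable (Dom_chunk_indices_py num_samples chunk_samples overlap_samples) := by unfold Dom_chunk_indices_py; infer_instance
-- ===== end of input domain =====

-- B computes the number of chunks arithmetically (capped ceiling division) and builds the
-- list with one map over a range, instead of A's stateful while-loop with a break.

-- ===== PORT A =====
-- the while-loop of A: start advances by step = max(chunk - overlap, 1) ≥ 1 each turn
def chunkLoopA (num_samples chunk_samples overlap_samples start : Int) : List (Int × Int) :=
  if _h : start < num_samples then
    let e := min (start + chunk_samples) num_samples
    if e = num_samples then [(start, e)]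
    else (start, e) :: chunkLoopA num_samples chunk_samples overlap_samples
      (start + max (chunk_samples - overlap_samples) 1)
  else []
termination_by (num_samples - start).toNat
decreasing_by
  have h1 : (1 : Int) ≤ max (chunk_samples - overlap_samples) 1 := le_max_right _ _
  omega

def chunk_indices_py (num_samples : Int) (chunk_samples : Int) (overlap_samples : Int) : List (Int × Int) :=
  if chunk_samples ≤ 0 ∨ num_samples ≤ chunk_samples then [(0, num_samples)]
  else chunkLoopA num_samples chunk_samples overlap_samples 0

-- ===== PORT B =====
def chunk_indices_py_alt (num_samples : Int) (chunk_samples : Int) (overlap_samples : Int) : List (Int × Int) :=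
  if chunk_samples ≤ 0 ∨ num_samples ≤ chunk_samples then [(0, num_samples)]
  else
    let step := max (chunk_samples - overlap_samples) 1
    let last := min (PySem.Int.floordiv (num_samples - chunk_samples + step - 1) step)
                    (PySem.Int.floordiv (num_samples - 1) step)
    (PySem.List.pyRange 0 (last + 1) 1).map
      (fun i => (i * step, min (i * step + chunk_samples) num_samples))

-- ===== PRECONDITION & SPEC =====
def Spec_chunk_indices_py (num_samples : Int) (chunk_samples : Int) (overlap_samples : Int) (out : List (Int × Int)) : Prop := out = chunk_indices_py_alt num_samples chunk_samples overlap_samples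
instance (num_samples : Int) (chunk_samples : Int) (overlap_samples : Int) (out : List (Int × Int)) : Decidable (Spec_chunk_indices_py num_samples chunk_samples overlap_samples out) := by unfold Spec_chunk_indices_py; infer_instance

-- ===== CLAIM (what is proved, stated in full; the proofs are below) =====
def Claim_equal_chunk_indices_py : Prop := ∀ (num_samples : Int) (chunk_samples : Int) (overlap_samples : Int), Dom_chunk_indices_py num_samples chunk_samples overlap_samples → Spec_chunk_indices_py num_samples chunk_samples overlap_samples (chunk_indices_py num_samples chunk_samples overlap_samples)

-- ===== LEMMAS AND PROOFS =====

-- loop invariant: from start = i * step, A's loop produces exactly the chunks i, i+1, …, last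
lemma chunkLoopA_eq (num chunk overlap : Int) :
    ∀ (k : Nat) (i : Int), 0 ≤ i →
      i ≤ min (PySem.Int.floordiv (num - chunk + max (chunk - overlap) 1 - 1) (max (chunk - overlap) 1))
              (PySem.Int.floordiv (num - 1) (max (chunk - overlap) 1)) →
      (min (PySem.Int.floordiv (num - chunk + max (chunk - overlap) 1 - 1) (max (chunk - overlap) 1))
              (PySem.Int.floordiv (num - 1) (max (chunk - overlap) 1)) + 1 - i).toNat ≤ k →
      chunkLoopA num chunk overlap (i * max (chunk - overlap) 1) =
        (PySem.List.pyRange i (min (PySem.Int.floordiv (num - chunk + max (chunk - overlap) 1 - 1) (max (chunk - overlap) 1))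
              (PySem.Int.floordiv (num - 1) (max (chunk - overlap) 1)) + 1) 1).map
          (fun j => (j * max (chunk - overlap) 1, min (j * max (chunk - overlap) 1 + chunk) num)) := by
  set s := max (chunk - overlap) 1 with hs
  have hs1 : (1 : Int) ≤ s := le_max_right _ _
  have hd1 : PySem.Int.floordiv (num - chunk + s - 1) s = (num - chunk + s - 1) / s :=
    PySem.Int.floordiv_eq_ediv_of_pos (by omega)
  have hd2 : PySem.Int.floordiv (num - 1) s = (num - 1) / s :=
    PySem.Int.floordiv_eq_ediv_of_pos (by omega)
  set q1 := (num - chunk + s - 1) / s with hq1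
  set q2 := (num - 1) / s with hq2
  set m := min (PySem.Int.floordiv (num - chunk + s - 1) s) (PySem.Int.floordiv (num - 1) s) with hm
  have hmm : m = min q1 q2 := by rw [hm, hd1, hd2]
  -- floor-division brackets (s > 0)
  have hb1 : s * q1 ≤ num - chunk + s - 1 ∧ num - chunk + s - 1 < s * q1 + s := by
    have h : s * q1 + (num - chunk + s - 1) % s = num - chunk + s - 1 := by
      rw [hq1]; exact Int.mul_ediv_add_emod _ _
    have h2 := Int.emod_nonneg (num - chunk + s - 1) (by omega : s ≠ 0)
    have h3 := Int.emod_lt_of_pos (num - chunk + s - 1) (by omega : 0 < s)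
    omega
  have hb2 : s * q2 ≤ num - 1 ∧ num - 1 < s * q2 + s := by
    have h : s * q2 + (num - 1) % s = num - 1 := by
      rw [hq2]; exact Int.mul_ediv_add_emod _ _
    have h2 := Int.emod_nonneg (num - 1) (by omega : s ≠ 0)
    have h3 := Int.emod_lt_of_pos (num - 1) (by omega : 0 < s)
    omega
  intro k
  induction k with
  | zero =>
      intro i hi0 him hk
      omega
  | succ k ih =>
      intro i hi0 him hk
      have hstartlt : i * s < num := by
        have h : i * s ≤ q2 * s :=
          mul_le_mul_of_nonneg_right (by omega) (by omega)
        nlinarith [hb2.1]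
      rw [chunkLoopA, dif_pos hstartlt]
      by_cases hbreak : min (i * s + chunk) num = num
      · -- break case: this is the last chunk, i = m
        have hge : num ≤ i * s + chunk := by omega
        have hceil : q1 ≤ i := by
          by_contra hlt
          have h : (i + 1) * s ≤ q1 * s :=
            mul_le_mul_of_nonneg_right (by omega) (by omega)
          nlinarith [hb1.1]
        have hieq : i = m := by omega
        rw [PySem.List.pyRange_one_cons (by omega), PySem.List.pyRange_one_eq_nil (by omega)]
        simp [hbreak]
      · -- continue case: i < ceiling bound, recurse (or the loop condition ends it at i = m)
        have hlt : i * s + chunk < num := by omega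
        have h1 : i + 1 ≤ q1 := by
          by_contra hno
          have h : q1 * s ≤ i * s :=
            mul_le_mul_of_nonneg_right (by omega) (by omega)
          nlinarith [hb1.2]
        rw [PySem.List.pyRange_one_cons (by omega)]
        simp only [List.map_cons]
        rw [show i * s + s = (i + 1) * s by ring]
        rw [show (min (i * s + chunk) num) = i * s + chunk by omega]
        rw [if_neg (show ¬ i * s + chunk = num by omega)]
        by_cases him2 : i < m
        · rw [ih (i + 1) (by omega) (by omega) (by omega)]
        · -- i = m: the next start is past num, both sides end here
          have hieq : i = m := by omega
          have hq2i : i = q2 := by omega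
          have hnum : num ≤ (i + 1) * s := by
            have : (i + 1) * s = s * q2 + s := by rw [hq2i]; ring
            omega
          rw [chunkLoopA, dif_neg (by omega), PySem.List.pyRange_one_eq_nil (by omega)]
          simp

-- ===== VERDICT (by name: the statement is the Claim_ definition above) =====
theorem chunk_indices_py_spec : Claim_equal_chunk_indices_py := by
  intro num chunk overlap _
  unfold Spec_chunk_indices_py chunk_indices_py chunk_indices_py_alt
  by_cases hg : chunk ≤ 0 ∨ num ≤ chunk
  · simp [hg]
  · simp only [not_or, not_le] at hg
    rw [if_neg (by omega)]
    rw [if_neg (by omega)]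
    have h := chunkLoopA_eq num chunk overlap
      (min (PySem.Int.floordiv (num - chunk + max (chunk - overlap) 1 - 1) (max (chunk - overlap) 1))
           (PySem.Int.floordiv (num - 1) (max (chunk - overlap) 1)) + 1).toNat 0 le_rfl ?_ ?_
    · simpa using h
    · -- 0 ≤ m
      have hs1 : (1 : Int) ≤ max (chunk - overlap) 1 := le_max_right _ _
      have hd1 : PySem.Int.floordiv (num - chunk + max (chunk - overlap) 1 - 1) (max (chunk - overlap) 1)
          = (num - chunk + max (chunk - overlap) 1 - 1) / (max (chunk - overlap) 1) :=
        PySem.Int.floordiv_eq_ediv_of_pos (by omega)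
      have hd2 : PySem.Int.floordiv (num - 1) (max (chunk - overlap) 1)
          = (num - 1) / (max (chunk - overlap) 1) :=
        PySem.Int.floordiv_eq_ediv_of_pos (by omega)
      rw [hd1, hd2]
      have h1 : 0 ≤ (num - chunk + max (chunk - overlap) 1 - 1) / (max (chunk - overlap) 1) :=
        Int.ediv_nonneg (by omega) (by omega)
      have h2 : 0 ≤ (num - 1) / (max (chunk - overlap) 1) := Int.ediv_nonneg (by omega) (by omega)
      omega
    · omega
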